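-- pv_equiv track=rewrite | github.com/pypi-data/pypi-mirror-399 | packages/klaude-code/klaude_code-1.8.0-py3-none-any.whl/klaude_code/command/release_notes_cmd.py | _extract_releases
-- ===== SOURCE A (Python) =====
-- def _extract_releases(changelog: str, count: int = 1) -> str:
--     """Extract release sections from changelog in reverse order (oldest first).
--
--     Args:
--         changelog: The full changelog content.
--         count: Number of releases to extract (default 1).
--
--     Returns:
--         The content of the specified number of releases, with newest at bottom.
--     """
--     lines = changelog.split("\n")
--     releases: list[list[str]] = []
--     current_release: list[str] = []
--     version_count = 0
--
--     for line in lines: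
--         # Skip [Unreleased] section header
--         if line.startswith("## [Unreleased]"):
--             continue
--
--         # Check for version header (e.g., ## [1.2.8] - 2025-12-01)
--         if line.startswith("## [") and "]" in line:
--             if current_release:
--                 releases.append(current_release)
--             version_count += 1
--             if version_count > count:
--                 break
--             current_release = [line]
--             continue
--
--         if version_count > 0:
--             current_release.append(line)
--
--     # Append the last release if exists
--     if current_release and version_count <= count:
--         releases.append(current_release)
--
--     if not releases:
--         return "No release notes found"
--
--     # Reverse to show oldest first, newest last
--     releases.reverse()
--     return "\n".join("\n".join(release) for release in releases).strip()
-- ===== SOURCE B (Python) =====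
-- def _is_header(line: str) -> bool:
--     return line.startswith("## [") and "]" in line
--
--
-- def _sections(lines):
--     """Split lines into release sections: each starts at a header line and runs
--     to the next header (or end of input); lines before the first header dropped."""
--     secs = []
--     i = 0
--     n = len(lines)
--     while i < n:
--         if _is_header(lines[i]):
--             j = i + 1
--             while j < n and not _is_header(lines[j]):
--                 j += 1
--             secs.append(lines[i:j])
--             i = j
--         else:
--             i += 1
--     return secs
--
--
-- def _extract_releases(changelog: str, count: int = 1) -> str:
--     lines = [l for l in changelog.split("\n") if not l.startswith("## [Unreleased]")]
--     secs = _sections(lines)[:count] if count > 0 else []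
--     if not secs:
--         return "No release notes found"
--     secs.reverse()
--     return "\n".join("\n".join(s) for s in secs).strip()
-- ===== Notes on version B (the rewrite author's own statement) =====
-- stated objective: simpler
-- what changed: A's single-pass state machine (current_release buffer, version counter, break, post-loop flush) is replaced by a pipeline: filter out '## [Unreleased]' lines, split the remaining lines into header-delimited sections with a two-pointer scan, then slice off the first `count` sections and reverse-join them.
import Mathlib
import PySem

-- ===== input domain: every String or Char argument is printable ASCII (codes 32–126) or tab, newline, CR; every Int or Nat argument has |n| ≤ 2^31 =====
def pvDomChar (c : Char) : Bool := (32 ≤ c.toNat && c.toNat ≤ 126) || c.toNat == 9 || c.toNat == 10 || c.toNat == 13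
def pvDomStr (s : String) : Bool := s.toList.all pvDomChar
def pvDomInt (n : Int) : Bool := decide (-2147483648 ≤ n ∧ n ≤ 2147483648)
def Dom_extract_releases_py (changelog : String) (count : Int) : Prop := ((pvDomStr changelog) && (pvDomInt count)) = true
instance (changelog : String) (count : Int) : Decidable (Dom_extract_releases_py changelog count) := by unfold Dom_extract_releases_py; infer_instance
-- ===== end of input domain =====

-- B replaces A's one-pass counter/break state machine by filter + section-splitting + a slice (objective: simpler decomposition; same cost).

-- ===== PORT A =====
-- A's for-loop with break: state (releases, current_release, version_count); returns the state at loop exit.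
-- changelog.split("\n"): sep is the nonempty literal "\n", so PySem.Str.split? is always `some`; `.getD []` only unwraps it.
def pvLoopA (count : Int) : List String → List (List String) → List String → Int →
    List (List String) × List String × Int
  | [], rels, cur, vc => (rels, cur, vc)
  | l :: ls, rels, cur, vc =>
    if PySem.Str.startswith l "## [Unreleased]" then
      pvLoopA count ls rels cur vc
    else if PySem.Str.startswith l "## [" && PySem.Str.isIn "]" l then
      let rels' := if cur ≠ [] then rels ++ [cur] else rels
      if vc + 1 > count then (rels', cur, vc + 1)        -- break
      else pvLoopA count ls rels' [l] (vc + 1)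
    else if vc > 0 then pvLoopA count ls rels (cur ++ [l]) vc
    else pvLoopA count ls rels cur vc

def extract_releases_py (changelog : String) (count : Int) : String :=
  let lines := (PySem.Str.split? changelog "\n").getD []
  let st := pvLoopA count lines [] [] 0
  let rels := if st.2.1 ≠ [] ∧ st.2.2 ≤ count then st.1 ++ [st.2.1] else st.1
  if rels = [] then "No release notes found"
  else PySem.Str.strip (PySem.Str.join "\n" (rels.reverse.map (fun r => PySem.Str.join "\n" r)))

-- ===== PORT B =====
def pvIsHeader (l : String) : Bool := PySem.Str.startswith l "## [" && PySem.Str.isIn "]" l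

-- Source B's _sections: the inner index scan 'j' and the slice lines[i:j] are ported as
-- takeWhile/dropWhile on the suffix — the same section values, computed in the same order.
def pvSectionsB : List String → List (List String)
  | [] => []
  | l :: ls =>
    if pvIsHeader l then
      (l :: ls.takeWhile (fun x => !pvIsHeader x)) :: pvSectionsB (ls.dropWhile (fun x => !pvIsHeader x))
    else pvSectionsB ls
  termination_by ls => ls.length
  decreasing_by
  · simpa using Nat.lt_succ_of_le (List.length_dropWhile_le _ _)
  · simp

def extract_releases_py_alt (changelog : String) (count : Int) : String :=
  let lines := ((PySem.Str.split? changelog "\n").getD []).filter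
    (fun l => !PySem.Str.startswith l "## [Unreleased]")
  let secs := if 0 < count then (pvSectionsB lines).take count.toNat else []
  if secs = [] then "No release notes found"
  else PySem.Str.strip (PySem.Str.join "\n" (secs.reverse.map (fun s => PySem.Str.join "\n" s)))

-- ===== PRECONDITION & SPEC =====
def Spec_extract_releases_py (changelog : String) (count : Int) (out : String) : Prop := out = extract_releases_py_alt changelog count
instance (changelog : String) (count : Int) (out : String) : Decidable (Spec_extract_releases_py changelog count out) := by unfold Spec_extract_releases_py; infer_instance

-- ===== CLAIM (what is proved, stated in full; the proofs are below) =====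
def Claim_equal_extract_releases_py : Prop := ∀ (changelog : String) (count : Int), Dom_extract_releases_py changelog count → Spec_extract_releases_py changelog count (extract_releases_py changelog count)

-- ===== LEMMAS AND PROOFS =====

-- A's final state, after the post-loop 'append the last release' step.
def pvFin (st : List (List String) × List String × Int) (count : Int) : List (List String) :=
  if st.2.1 ≠ [] ∧ st.2.2 ≤ count then st.1 ++ [st.2.1] else st.1

-- A's loop with the '[Unreleased]'-skip branch removed (to be run on the pre-filtered lines).
def pvLoopA' (count : Int) : List String → List (List String) → List String → Int →
    List (List String) × List String × Int
  | [], rels, cur, vc => (rels, cur, vc)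
  | l :: ls, rels, cur, vc =>
    if pvIsHeader l then
      let rels' := if cur ≠ [] then rels ++ [cur] else rels
      if vc + 1 > count then (rels', cur, vc + 1)
      else pvLoopA' count ls rels' [l] (vc + 1)
    else if vc > 0 then pvLoopA' count ls rels (cur ++ [l]) vc
    else pvLoopA' count ls rels cur vc

-- one-step unfolding lemmas
lemma pvLoopA'_nil (count : Int) (rels : List (List String)) (cur : List String) (vc : Int) :
    pvLoopA' count [] rels cur vc = (rels, cur, vc) := rfl

lemma pvLoopA'_break (count : Int) (l : String) (ls : List String) (rels : List (List String))
    (cur : List String) (vc : Int) (h : pvIsHeader l = true) (hb : vc + 1 > count) :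
    pvLoopA' count (l :: ls) rels cur vc
      = ((if cur ≠ [] then rels ++ [cur] else rels), cur, vc + 1) := by
  simp only [pvLoopA']; rw [if_pos h, if_pos hb]

lemma pvLoopA'_header (count : Int) (l : String) (ls : List String) (rels : List (List String))
    (cur : List String) (vc : Int) (h : pvIsHeader l = true) (hb : ¬ vc + 1 > count) :
    pvLoopA' count (l :: ls) rels cur vc
      = pvLoopA' count ls (if cur ≠ [] then rels ++ [cur] else rels) [l] (vc + 1) := by
  simp only [pvLoopA']; rw [if_pos h, if_neg hb]

lemma pvLoopA'_mid (count : Int) (l : String) (ls : List String) (rels : List (List String))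
    (cur : List String) (vc : Int) (h : pvIsHeader l = false) (hv : vc > 0) :
    pvLoopA' count (l :: ls) rels cur vc = pvLoopA' count ls rels (cur ++ [l]) vc := by
  simp only [pvLoopA']; rw [if_neg (by simp [h]), if_pos hv]

lemma pvLoopA'_skip (count : Int) (l : String) (ls : List String) (rels : List (List String))
    (cur : List String) (vc : Int) (h : pvIsHeader l = false) (hv : ¬ vc > 0) :
    pvLoopA' count (l :: ls) rels cur vc = pvLoopA' count ls rels cur vc := by
  simp only [pvLoopA']; rw [if_neg (by simp [h]), if_neg hv]

lemma pvSectionsB_nil : pvSectionsB [] = [] := by simp [pvSectionsB]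

lemma pvSectionsB_header (l : String) (ls : List String) (h : pvIsHeader l = true) :
    pvSectionsB (l :: ls)
      = (l :: ls.takeWhile (fun x => !pvIsHeader x)) :: pvSectionsB (ls.dropWhile (fun x => !pvIsHeader x)) := by
  rw [pvSectionsB]; simp [h]

lemma pvSectionsB_skip (l : String) (ls : List String) (h : pvIsHeader l = false) :
    pvSectionsB (l :: ls) = pvSectionsB ls := by
  rw [pvSectionsB]; simp [h]

lemma pvFin_mk (rels : List (List String)) (cur : List String) (vc count : Int) :
    pvFin (rels, cur, vc) count = if cur ≠ [] ∧ vc ≤ count then rels ++ [cur] else rels := rfl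

lemma pvL1 (count : Int) (ls : List String) (rels : List (List String)) (cur : List String) (vc : Int) :
    pvLoopA count ls rels cur vc
      = pvLoopA' count (ls.filter (fun l => !PySem.Str.startswith l "## [Unreleased]")) rels cur vc := by
  induction ls generalizing rels cur vc with
  | nil => rfl
  | cons l t ih =>
    by_cases hs : PySem.Str.startswith l "## [Unreleased]" = true
    · rw [List.filter_cons_of_neg (by simp only [hs, Bool.not_true]; simp)]
      simp only [pvLoopA]
      rw [if_pos hs, ih]
    · rw [List.filter_cons_of_pos (by simp [Bool.not_eq_true] at hs ⊢; exact hs)]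
      simp only [pvLoopA, pvLoopA', pvIsHeader]
      rw [if_neg hs]
      split_ifs <;> first | rfl | apply ih

lemma pvDropWhileHead {α : Type} (p : α → Bool) :
    ∀ (ls : List α) (x : α) (t : List α), ls.dropWhile p = x :: t → p x = false := by
  intro ls
  induction ls with
  | nil => intro x t h; simp [List.dropWhile] at h
  | cons a l ih =>
    intro x t h
    by_cases hp : p a = true
    · exact ih x t (by simpa [List.dropWhile, hp] using h)
    · rw [List.dropWhile_cons_of_neg hp] at h
      cases h; simpa using hp

lemma pvL2 (count : Int) (ls : List String) (rels : List (List String)) :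
    pvLoopA' count ls rels [] 0
      = pvLoopA' count (ls.dropWhile (fun x => !pvIsHeader x)) rels [] 0 := by
  induction ls with
  | nil => rfl
  | cons l t ih =>
    by_cases h : pvIsHeader l = true
    · rw [List.dropWhile_cons_of_neg (by simp [h])]
    · rw [List.dropWhile_cons_of_pos (by simp [Bool.not_eq_true] at h ⊢; exact h),
          pvLoopA'_skip count l t rels [] 0 (by simpa using h) (by omega), ih]

lemma pvL4 (ls : List String) :
    pvSectionsB (ls.dropWhile (fun x => !pvIsHeader x)) = pvSectionsB ls := by
  induction ls with
  | nil => rfl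
  | cons l t ih =>
    by_cases h : pvIsHeader l = true
    · rw [List.dropWhile_cons_of_neg (by simp [h])]
    · rw [List.dropWhile_cons_of_pos (by simp [Bool.not_eq_true] at h ⊢; exact h),
          pvSectionsB_skip l t (by simpa using h), ih]

lemma pvL5 (count : Int) (hc : ¬ 0 < count) (ls : List String) (rels : List (List String)) :
    pvFin (pvLoopA' count ls rels [] 0) count = rels := by
  induction ls with
  | nil => simp [pvLoopA'_nil, pvFin_mk]
  | cons l t ih =>
    by_cases h : pvIsHeader l = true
    · rw [pvLoopA'_break count l t rels [] 0 h (by omega)]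
      simp [pvFin_mk]
    · rw [pvLoopA'_skip count l t rels [] 0 (by simpa using h) (by omega), ih]

lemma pvL3 (count : Int) (ls : List String) (rels : List (List String)) (cur : List String) (vc : Int)
    (hcur : cur ≠ []) (h1 : 0 < vc) (h2 : vc ≤ count) :
    pvFin (pvLoopA' count ls rels cur vc) count
      = rels ++ (cur ++ ls.takeWhile (fun x => !pvIsHeader x))
          :: ((pvSectionsB (ls.dropWhile (fun x => !pvIsHeader x))).take (count - vc).toNat) := by
  induction ls generalizing rels cur vc with
  | nil =>
    rw [pvLoopA'_nil, pvFin_mk, if_pos ⟨hcur, h2⟩]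
    simp [pvSectionsB_nil]
  | cons l t ih =>
    by_cases h : pvIsHeader l = true
    · rw [List.takeWhile_cons_of_neg (by simp [h]), List.dropWhile_cons_of_neg (by simp [h]),
          pvSectionsB_header l t h]
      by_cases hvc : vc + 1 > count
      · have ht : (count - vc).toNat = 0 := by omega
        rw [pvLoopA'_break count l t rels cur vc h hvc, pvFin_mk,
            if_neg (by intro ⟨_, hle⟩; omega)]
        rw [if_pos hcur, ht]
        simp
      · rw [pvLoopA'_header count l t rels cur vc h hvc, if_pos hcur,
            ih (rels ++ [cur]) [l] (vc + 1) (by simp) (by omega) (by omega)]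
        have hn : (count - vc).toNat = (count - (vc + 1)).toNat + 1 := by omega
        rw [hn]
        simp
    · rw [List.takeWhile_cons_of_pos (by simp [Bool.not_eq_true] at h ⊢; exact h),
          List.dropWhile_cons_of_pos (by simp [Bool.not_eq_true] at h ⊢; exact h),
          pvLoopA'_mid count l t rels cur vc (by simpa using h) (by omega),
          ih rels (cur ++ [l]) vc (by simp) h1 h2]
      simp

lemma pvCentral (count : Int) (ls : List String) :
    pvFin (pvLoopA' count ls [] [] 0) count
      = if 0 < count then (pvSectionsB ls).take count.toNat else [] := by
  by_cases hc : 0 < count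
  · rw [if_pos hc, ← pvL4, pvL2]
    cases hdw : ls.dropWhile (fun x => !pvIsHeader x) with
    | nil => simp [pvLoopA'_nil, pvFin_mk, pvSectionsB_nil]
    | cons l t =>
      have hl : pvIsHeader l = true := by
        have := pvDropWhileHead (fun x => !pvIsHeader x) ls l t hdw
        simpa using this
      rw [pvLoopA'_header count l t [] [] 0 hl (by omega)]
      rw [show (if ([] : List String) ≠ [] then ([] : List (List String)) ++ [[]] else []) = [] by simp,
          show (0:Int) + 1 = 1 from by norm_num]
      rw [pvL3 count t [] [l] 1 (by simp) (by omega) (by omega)]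
      rw [pvSectionsB_header l t hl]
      have hn : (count - 1).toNat = count.toNat - 1 := by omega
      have hpos : count.toNat = (count.toNat - 1) + 1 := by omega
      rw [hpos, List.take_succ_cons, hn]
      simp
  · rw [if_neg hc, pvL5 count hc]

-- ===== VERDICT (by name: the statement is the Claim_ definition above) =====
theorem extract_releases_py_spec : Claim_equal_extract_releases_py := by
  intro changelog count _
  unfold Spec_extract_releases_py extract_releases_py extract_releases_py_alt
  have key : pvFin (pvLoopA count ((PySem.Str.split? changelog "\n").getD []) [] [] 0) count
      = (if 0 < count then
          (pvSectionsB (((PySem.Str.split? changelog "\n").getD []).filter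
            (fun l => !PySem.Str.startswith l "## [Unreleased]"))).take count.toNat
         else []) := by
    rw [pvL1, pvCentral]
  simp only [pvFin] at key
  simp only [key]
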